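-- pv_equiv track=rewrite | github.com/tnndbtc/agent | novel_agent/modules/consistency_checker.py | _parse_timeline_report
-- ===== SOURCE A (Python) =====
-- from typing import Dict, Any, List, Optional
--
-- def _parse_timeline_report(response: str) -> Dict[str, Any]:
--     """Parse timeline consistency report."""
--     result = {'issues': [], 'timeline_notes': [], 'recommendations': []}
--
--     current_section = None
--
--     for line in response.split('\n'):
--         line_stripped = line.strip()
--         line_upper = line_stripped.upper()
--
--         if line_upper.startswith('ISSUES:'):
--             current_section = 'issues'
--         elif line_upper.startswith('TIMELINE NOTES:'):
--             current_section = 'timeline_notes'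
--         elif line_upper.startswith('RECOMMENDATIONS:'):
--             current_section = 'recommendations'
--         elif line_stripped.startswith('- ') and current_section:
--             result[current_section].append(line_stripped[2:])
--
--     return result
-- ===== SOURCE B (Python) =====
-- def _key_of(stripped: str):
--     u = stripped.upper()
--     if u.startswith('ISSUES:'):
--         return 'issues'
--     if u.startswith('TIMELINE NOTES:'):
--         return 'timeline_notes'
--     if u.startswith('RECOMMENDATIONS:'):
--         return 'recommendations'
--     return None
--
--
-- def _parse_timeline_report(response: str):
--     """Parse timeline consistency report (span-based: segment lines at headers)."""
--     result = {'issues': [], 'timeline_notes': [], 'recommendations': []}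
--     rest = [line.strip() for line in response.split('\n')]
--     while rest:
--         head, rest = rest[0], rest[1:]
--         key = _key_of(head)
--         if key is None:
--             continue  # not a header: outside any span start (pre-header lines dropped)
--         span = []
--         while rest and _key_of(rest[0]) is None:
--             span.append(rest[0])
--             rest = rest[1:]
--         result[key].extend(s[2:] for s in span if s.startswith('- '))
--     return result
-- ===== Notes on version B (the rewrite author's own statement) =====
-- stated objective: alternative
-- what changed: A is a line-by-line state machine carrying a current_section flag; B instead segments the stripped line list into header-delimited spans (pop a header, consume its span of non-header lines) and appends each span's bullets to that header's list in one extend.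
import Mathlib
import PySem

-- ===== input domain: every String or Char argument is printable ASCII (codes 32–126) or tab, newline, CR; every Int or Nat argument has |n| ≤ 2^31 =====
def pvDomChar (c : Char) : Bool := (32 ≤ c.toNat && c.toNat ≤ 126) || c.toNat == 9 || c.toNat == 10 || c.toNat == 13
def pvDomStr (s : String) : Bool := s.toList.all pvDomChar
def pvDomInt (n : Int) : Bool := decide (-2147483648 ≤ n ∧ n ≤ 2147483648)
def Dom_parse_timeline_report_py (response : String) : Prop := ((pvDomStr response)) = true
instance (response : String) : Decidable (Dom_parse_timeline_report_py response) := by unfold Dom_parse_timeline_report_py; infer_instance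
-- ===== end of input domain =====

-- B replaces A's line-by-line state machine (current_section flag) by a span decomposition:
-- it segments the stripped lines at section headers and collects each span's bullets in one go;
-- objective: alternative decomposition, same cost. Return value only (A mutates nothing observable).

-- ===== PORT A =====
-- A's loop body on the already-stripped line (A computes line_stripped first, then branches).
def pvStepA (st : Option String × PySem.Dict String (List String)) (ls : String) :
    Option String × PySem.Dict String (List String) :=
  let lu := PySem.Str.upper ls
  if PySem.Str.startswith lu "ISSUES:" then (some "issues", st.2)
  else if PySem.Str.startswith lu "TIMELINE NOTES:" then (some "timeline_notes", st.2)
  else if PySem.Str.startswith lu "RECOMMENDATIONS:" then (some "recommendations", st.2)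
  else
    match st.1 with
    | some k =>
        if PySem.Str.startswith ls "- " then
          (some k, st.2.modify k [] (fun v => v ++ [PySem.Str.slice ls (some 2) none]))
        else st
    | none => st

def parse_timeline_report_py (response : String) : List (String × List String) :=
  let init : PySem.Dict String (List String) :=
    PySem.Dict.mk [("issues", []), ("timeline_notes", []), ("recommendations", [])]
  (((PySem.Str.split? response "\n").getD []).foldl
    (fun st line => pvStepA st (PySem.Str.strip line)) (none, init)).2.items

-- ===== PORT B =====
def pvKeyOf (s : String) : Option String :=
  let u := PySem.Str.upper s
  if PySem.Str.startswith u "ISSUES:" then some "issues"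
  else if PySem.Str.startswith u "TIMELINE NOTES:" then some "timeline_notes"
  else if PySem.Str.startswith u "RECOMMENDATIONS:" then some "recommendations"
  else none

-- one outer iteration of B's while loop: pop the head; a header owns the span of
-- following non-header lines, whose "- " bullets are appended to its list at once
def pvAltGo (d : PySem.Dict String (List String)) :
    List String → PySem.Dict String (List String)
  | [] => d
  | head :: rest =>
    match pvKeyOf head with
    | none => pvAltGo d rest
    | some k =>
      let span := rest.takeWhile (fun s => (pvKeyOf s).isNone)
      let rest' := rest.dropWhile (fun s => (pvKeyOf s).isNone)
      pvAltGo (d.modify k [] (fun v =>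
        v ++ (span.filter (fun s => PySem.Str.startswith s "- ")).map
              (fun s => PySem.Str.slice s (some 2) none))) rest'
  termination_by ls => ls.length
  decreasing_by
    · simp
    · simp only [List.length_cons]
      exact Nat.lt_succ_of_le (List.length_dropWhile_le _ _)

def parse_timeline_report_py_alt (response : String) : List (String × List String) :=
  let init : PySem.Dict String (List String) :=
    PySem.Dict.mk [("issues", []), ("timeline_notes", []), ("recommendations", [])]
  (pvAltGo init (((PySem.Str.split? response "\n").getD []).map PySem.Str.strip)).items

-- ===== PRECONDITION & SPEC =====
def Spec_parse_timeline_report_py (response : String) (out : List (String × List String)) : Prop := out = parse_timeline_report_py_alt response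
instance (response : String) (out : List (String × List String)) : Decidable (Spec_parse_timeline_report_py response out) := by unfold Spec_parse_timeline_report_py; infer_instance

-- ===== CLAIM (what is proved, stated in full; the proofs are below) =====
def Claim_equal_parse_timeline_report_py : Prop := ∀ (response : String), Dom_parse_timeline_report_py response → Spec_parse_timeline_report_py response (parse_timeline_report_py response)

-- ===== LEMMAS AND PROOFS =====

-- the three keys of the result dict never change
def pvInv (d : PySem.Dict String (List String)) : Prop :=
  d.keys = ["issues", "timeline_notes", "recommendations"]

theorem pvKeyOf_mem {s k : String} (h : pvKeyOf s = some k) :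
    k = "issues" ∨ k = "timeline_notes" ∨ k = "recommendations" := by
  simp only [pvKeyOf] at h
  split_ifs at h <;> simp_all

theorem pvInv_contains {d : PySem.Dict String (List String)} (h : pvInv d) {k : String}
    (hk : k = "issues" ∨ k = "timeline_notes" ∨ k = "recommendations") :
    d.contains k = true := by
  have : k ∈ d.keys := by rw [h]; rcases hk with h | h | h <;> simp [h]
  simpa [PySem.Dict.contains, PySem.Dict.keys, List.any_eq_true] using
    (by simpa [PySem.Dict.keys] using this : k ∈ d.items.map Prod.fst)

theorem pvInv_modify {d : PySem.Dict String (List String)} (h : pvInv d) {k : String}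
    (hk : k = "issues" ∨ k = "timeline_notes" ∨ k = "recommendations")
    (f : List String → List String) : pvInv (d.modify k [] f) := by
  unfold pvInv
  rw [PySem.Dict.keys_modify, PySem.Dict.keys_insert_of_contains _ _ (pvInv_contains h hk)]
  exact h

theorem pvModify_id {d : PySem.Dict String (List String)} (h : pvInv d) {k : String}
    (hk : k = "issues" ∨ k = "timeline_notes" ∨ k = "recommendations") :
    d.modify k [] (fun v => v ++ []) = d := by
  have hc := pvInv_contains h hk
  have hnd : ∀ p ∈ d.items, ∀ q ∈ d.items, p.1 = q.1 → p = q := by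
    intro p hp q hq hpq
    have : (d.items.map Prod.fst).Nodup := by
      have := h; unfold pvInv at this
      simp only [PySem.Dict.keys] at this
      rw [this]; decide
    have hinj := List.inj_on_of_nodup_map this
    have := hinj hp hq (by simpa using hpq)
    exact this
  -- modify k [] (·++[]) = insert k (getD k []) ; with unique keys this rewrites each
  -- matching entry to itself
  simp only [PySem.Dict.modify, PySem.Dict.insert, hc, if_pos]
  apply PySem.Dict.ext
  -- the (unique) entry with key k is replaced by (k, its own value)
  rcases hfind : d.items.find? (fun p => p.1 == k) with _ | ⟨p⟩
  · exact absurd (by simpa [PySem.Dict.contains, List.any_eq_true, List.find?_eq_none] using hfind)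
      (by simpa [PySem.Dict.contains, List.any_eq_true] using hc)
  · have hpk : p.1 = k := by
      have := List.find?_some hfind
      simpa using this
    have hpmem : p ∈ d.items := List.mem_of_find?_eq_some hfind
    conv_rhs => rw [← List.map_id d.items]
    apply List.map_congr_left
    intro q hq
    by_cases hqk : q.1 = k
    · have hqp : q = p := hnd q hq p hpmem (hqk.trans hpk.symm)
      subst hqp
      simp [hqk, PySem.Dict.getD, PySem.Dict.get?, hfind, Prod.ext_iff]
    · simp [hqk, id]

theorem pvModify_modify {d : PySem.Dict String (List String)} (k : String)
    (f g : List String → List String) :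
    (d.modify k [] f).modify k [] g = d.modify k [] (fun v => g (f v)) := by
  simp [PySem.Dict.modify, PySem.Dict.getD_insert_self, PySem.Dict.insert_insert_self]

-- pvStepA, re-expressed through B's header classifier (the branches coincide)
theorem pvStepA_eq (st : Option String × PySem.Dict String (List String)) (ls : String) :
    pvStepA st ls =
      match pvKeyOf ls with
      | some k => (some k, st.2)
      | none =>
        match st.1 with
        | some k =>
            if PySem.Str.startswith ls "- " then
              (some k, st.2.modify k [] (fun v => v ++ [PySem.Str.slice ls (some 2) none]))
            else st
        | none => st := by
  simp only [pvStepA, pvKeyOf]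
  split_ifs <;> rfl

-- A's fold, started inside section k, equals B's treatment of the current span
theorem pvFold_some (ls : List String) : ∀ (k : String)
    (d : PySem.Dict String (List String)), pvInv d →
    (k = "issues" ∨ k = "timeline_notes" ∨ k = "recommendations") →
    (ls.foldl pvStepA (some k, d)).2 =
      pvAltGo (d.modify k [] (fun v =>
        v ++ ((ls.takeWhile (fun s => (pvKeyOf s).isNone)).filter
                (fun s => PySem.Str.startswith s "- ")).map
              (fun s => PySem.Str.slice s (some 2) none)))
        (ls.dropWhile (fun s => (pvKeyOf s).isNone)) := by
  induction ls with
  | nil =>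
    intro k d hinv hk
    simp only [List.foldl_nil, List.takeWhile_nil, List.dropWhile_nil, List.filter_nil,
      List.map_nil]
    rw [pvModify_id hinv hk, pvAltGo]
  | cons head rest ih =>
    intro k d hinv hk
    simp only [List.foldl_cons, pvStepA_eq]
    rcases hh : pvKeyOf head with _ | ⟨k'⟩
    · have hbcases : PySem.Str.startswith head "- " = true ∨
          PySem.Str.startswith head "- " = false := by
        cases PySem.Str.startswith head "- " <;> simp
      rcases hbcases with hb | hb
      · simp only [List.takeWhile_cons, List.dropWhile_cons, hh, Option.isNone_none, reduceIte,
          hb, List.filter_cons]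
        rw [ih k _ (pvInv_modify hinv hk _) hk, pvModify_modify]
        have hfun : (fun v : List String =>
            (v ++ [PySem.Str.slice head (some 2) none]) ++
              ((rest.takeWhile (fun s => (pvKeyOf s).isNone)).filter
                  (fun s => PySem.Str.startswith s "- ")).map
                (fun s => PySem.Str.slice s (some 2) none)) =
            (fun v : List String =>
            v ++ (PySem.Str.slice head (some 2) none ::
              ((rest.takeWhile (fun s => (pvKeyOf s).isNone)).filter
                  (fun s => PySem.Str.startswith s "- ")).map
                (fun s => PySem.Str.slice s (some 2) none))) := by
          funext v; simp
        rw [hfun, List.map_cons]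
      · simp only [List.takeWhile_cons, List.dropWhile_cons, hh, Option.isNone_none, reduceIte,
          hb, Bool.false_eq_true, if_false, List.filter_cons]
        rw [ih k d hinv hk]
    · simp only [List.takeWhile_cons, List.dropWhile_cons, hh, Option.isNone_some,
        Bool.false_eq_true, if_false, List.filter_nil, List.map_nil]
      rw [pvModify_id hinv hk, ih k' d hinv (pvKeyOf_mem hh)]
      conv_rhs => rw [pvAltGo]
      simp [hh]

-- outside any section, A's fold equals B's segmentation from the top
theorem pvFold_none (ls : List String) : ∀ (d : PySem.Dict String (List String)), pvInv d →
    (ls.foldl pvStepA (none, d)).2 = pvAltGo d ls := by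
  induction ls with
  | nil => intro d _; rw [pvAltGo]; rfl
  | cons head rest ih =>
    intro d hinv
    simp only [List.foldl_cons, pvStepA_eq]
    rcases hh : pvKeyOf head with _ | ⟨k⟩
    · rw [ih d hinv]
      conv_rhs => rw [pvAltGo]
      simp [hh]
    · rw [pvFold_some rest k d hinv (pvKeyOf_mem hh)]
      conv_rhs => rw [pvAltGo]
      simp [hh]

-- ===== VERDICT (by name: the statement is the Claim_ definition above) =====
theorem parse_timeline_report_py_spec : Claim_equal_parse_timeline_report_py := by
  intro response _
  simp only [Spec_parse_timeline_report_py, parse_timeline_report_py,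
    parse_timeline_report_py_alt]
  rw [← List.foldl_map (f := PySem.Str.strip) (g := pvStepA),
    pvFold_none _ _ (by unfold pvInv; decide)]
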